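-- pv_equiv track=rewrite | github.com/bg-omar/VAM | VAM_PYTHON_SIMULATOINS/VAM_inference_demo/vam_infer/io.py | _pick_colname
-- ===== SOURCE A (Python) =====
-- from typing import List, Tuple, Optional
--
-- def _pick_colname(names: List[str], want: str) -> Optional[str]:
--     """
--     Heuristics to select a column by semantic intent:
--     - want="r"  -> pick first name containing 'r' and not 'rho' (case-insensitive)
--     - want="tau"-> name containing 'tau' or 't_ratio'
--     - want="g"  -> name equal/contains 'g'
--     """
--     low = [n.strip() for n in names]
--     if want == "r":
--         for n in low:
--             ln = n.lower()
--             if "rho" in ln:  # avoid mis-pick of density column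
--                 continue
--             if ln in ["r", "radius", "r_m"]: return n
--         for n in low:
--             if "r" in n.lower(): return n
--     elif want == "tau":
--         for n in low:
--             ln = n.lower()
--             if ln in ["tau", "t_ratio", "dt_local/dt_inf", "dt_local/dt_infty", "t_local_over_t_inf"]:
--                 return n
--         for n in low:
--             if "tau" in n.lower(): return n
--     elif want == "g":
--         for n in low:
--             ln = n.lower()
--             if ln in ["g", "g_m_s2", "g_ms2", "g_r"]:
--                 return n
--         for n in low:
--             if "g" in n.lower(): return n
--     return None
-- ===== SOURCE B (Python) =====
-- from typing import List, Optional
--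
-- _TABLE = {
--     "r": ({"r", "radius", "r_m"}, "r"),
--     "tau": ({"tau", "t_ratio", "dt_local/dt_inf", "dt_local/dt_infty",
--              "t_local_over_t_inf"}, "tau"),
--     "g": ({"g", "g_m_s2", "g_ms2", "g_r"}, "g"),
-- }
--
-- def _pick_colname(names: List[str], want: str) -> Optional[str]:
--     entry = _TABLE.get(want)
--     if entry is None:
--         return None
--     exact_set, token = entry
--     first_exact = first_sub = None
--     for raw in names:
--         n = raw.strip()
--         ln = n.lower()
--         if first_exact is None and ln in exact_set:
--             first_exact = n
--         if first_sub is None and token in ln: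
--             first_sub = n
--     return first_exact if first_exact is not None else first_sub
-- ===== Notes on version B (the rewrite author's own statement) =====
-- stated objective: alternative
-- what changed: Replaced A's per-want pair of scans (exact-match loop then substring-fallback loop) with a table mapping want to (exact set, substring token) and a single pass over the names tracking first_exact and first_substr.
import Mathlib
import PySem

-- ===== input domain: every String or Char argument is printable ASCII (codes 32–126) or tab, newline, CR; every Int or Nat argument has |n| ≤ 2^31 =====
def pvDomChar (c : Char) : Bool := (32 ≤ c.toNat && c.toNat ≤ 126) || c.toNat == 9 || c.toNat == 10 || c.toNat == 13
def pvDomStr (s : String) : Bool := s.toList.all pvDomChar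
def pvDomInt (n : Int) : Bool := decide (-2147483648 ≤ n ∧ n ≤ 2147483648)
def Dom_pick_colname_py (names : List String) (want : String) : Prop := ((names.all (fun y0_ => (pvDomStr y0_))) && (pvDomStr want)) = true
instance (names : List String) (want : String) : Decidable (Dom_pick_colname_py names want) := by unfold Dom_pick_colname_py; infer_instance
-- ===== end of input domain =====

-- B fuses A's two scans into one pass that tracks the first exact and first substring match; objective: alternative (single pass, table-driven).

-- ===== PORT A =====
-- first loop of the want=="r" branch: exact names, skipping any name containing 'rho'
def pvA_rExact : List String → Option String
  | [] => none
  | n :: rest =>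
    let ln := PySem.Str.lower n
    if PySem.Str.isIn "rho" ln then pvA_rExact rest
    else if ln ∈ (["r", "radius", "r_m"] : List String) then some n
    else pvA_rExact rest

-- first loop of the tau/g branches: exact name from the given list
def pvA_exact (exacts : List String) : List String → Option String
  | [] => none
  | n :: rest =>
    let ln := PySem.Str.lower n
    if ln ∈ exacts then some n else pvA_exact exacts rest

-- second loop of each branch: first name whose lowercase contains the token
def pvA_sub (token : String) : List String → Option String
  | [] => none
  | n :: rest =>
    if PySem.Str.isIn token (PySem.Str.lower n) then some n else pvA_sub token rest

def pick_colname_py (names : List String) (want : String) : Option String :=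
  let low := names.map PySem.Str.strip
  if want = "r" then
    match pvA_rExact low with
    | some n => some n
    | none => pvA_sub "r" low
  else if want = "tau" then
    match pvA_exact ["tau", "t_ratio", "dt_local/dt_inf", "dt_local/dt_infty", "t_local_over_t_inf"] low with
    | some n => some n
    | none => pvA_sub "tau" low
  else if want = "g" then
    match pvA_exact ["g", "g_m_s2", "g_ms2", "g_r"] low with
    | some n => some n
    | none => pvA_sub "g" low
  else none

-- ===== PORT B =====
def pvB_table : PySem.Dict String (PySem.Set String × String) :=
  PySem.Dict.ofList
    [ ("r", (PySem.Set.ofList ["r", "radius", "r_m"], "r")),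
      ("tau", (PySem.Set.ofList ["tau", "t_ratio", "dt_local/dt_inf", "dt_local/dt_infty", "t_local_over_t_inf"], "tau")),
      ("g", (PySem.Set.ofList ["g", "g_m_s2", "g_ms2", "g_r"], "g")) ]

def pvB_step (exactSet : PySem.Set String) (token : String)
    (st : Option String × Option String) (raw : String) : Option String × Option String :=
  let n := PySem.Str.strip raw
  let ln := PySem.Str.lower n
  let fe := if st.1 = none ∧ PySem.Set.contains exactSet ln then some n else st.1
  let fs := if st.2 = none ∧ PySem.Str.isIn token ln then some n else st.2
  (fe, fs)

def pick_colname_py_alt (names : List String) (want : String) : Option String :=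
  match PySem.Dict.get? pvB_table want with
  | none => none
  | some (exactSet, token) =>
    let st := names.foldl (pvB_step exactSet token) (none, none)
    match st.1 with
    | some n => some n
    | none => st.2

-- ===== PRECONDITION & SPEC =====
def Spec_pick_colname_py (names : List String) (want : String) (out : Option String) : Prop := out = pick_colname_py_alt names want
instance (names : List String) (want : String) (out : Option String) : Decidable (Spec_pick_colname_py names want out) := by unfold Spec_pick_colname_py; infer_instance

-- ===== CLAIM (what is proved, stated in full; the proofs are below) =====
def Claim_equal_pick_colname_py : Prop := ∀ (names : List String) (want : String), Dom_pick_colname_py names want → Spec_pick_colname_py names want (pick_colname_py names want)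

-- ===== LEMMAS AND PROOFS =====

-- proof-side characterisations of the two candidates B tracks
def pvFindExact (X : PySem.Set String) : List String → Option String
  | [] => none
  | raw :: rest =>
    let n := PySem.Str.strip raw
    if PySem.Set.contains X (PySem.Str.lower n) then some n else pvFindExact X rest

def pvFindSub (token : String) : List String → Option String
  | [] => none
  | raw :: rest =>
    let n := PySem.Str.strip raw
    if PySem.Str.isIn token (PySem.Str.lower n) then some n else pvFindSub token rest

theorem pvB_fold_eq (X : PySem.Set String) (token : String) :
    ∀ (names : List String) (e s : Option String),
      names.foldl (pvB_step X token) (e, s) =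
        (e.or (pvFindExact X names), s.or (pvFindSub token names)) := by
  intro names
  induction names with
  | nil => intro e s; simp [pvFindExact, pvFindSub]
  | cons raw rest ih =>
    intro e s
    cases e <;> cases s <;>
      simp only [List.foldl_cons, pvB_step] <;>
      split_ifs with h1 h2 h2 <;>
      simp_all [pvFindExact, pvFindSub]

theorem pvA_sub_eq (token : String) :
    ∀ (names : List String),
      pvA_sub token (names.map PySem.Str.strip) = pvFindSub token names := by
  intro names
  induction names with
  | nil => rfl
  | cons raw rest ih =>
    simp only [List.map_cons, pvA_sub, pvFindSub]
    split_ifs <;> simp [ih]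

theorem pvA_exact_eq (exacts : List String) :
    ∀ (names : List String),
      pvA_exact exacts (names.map PySem.Str.strip) =
        pvFindExact (PySem.Set.ofList exacts) names := by
  intro names
  induction names with
  | nil => rfl
  | cons raw rest ih =>
    simp only [List.map_cons, pvA_exact, pvFindExact]
    have hcb : PySem.Set.contains (PySem.Set.ofList exacts) (PySem.Str.lower (PySem.Str.strip raw)) = true
        ↔ PySem.Str.lower (PySem.Str.strip raw) ∈ exacts := by
      rw [PySem.Set.contains_iff, PySem.Set.mem_ofList]
    by_cases hm : PySem.Str.lower (PySem.Str.strip raw) ∈ exacts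
    · rw [if_pos hm, if_pos (hcb.mpr hm)]
    · rw [if_neg hm, if_neg (fun h => hm (hcb.mp h)), ih]

-- the 'rho' skip in A's r-branch is vacuous: no exact r-name contains 'rho'
theorem pvA_rExact_eq :
    ∀ (names : List String),
      pvA_rExact (names.map PySem.Str.strip) =
        pvFindExact (PySem.Set.ofList ["r", "radius", "r_m"]) names := by
  intro names
  induction names with
  | nil => rfl
  | cons raw rest ih =>
    simp only [List.map_cons, pvA_rExact, pvFindExact]
    have hcb : PySem.Set.contains (PySem.Set.ofList ["r", "radius", "r_m"]) (PySem.Str.lower (PySem.Str.strip raw)) = true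
        ↔ PySem.Str.lower (PySem.Str.strip raw) ∈ (["r", "radius", "r_m"] : List String) := by
      rw [PySem.Set.contains_iff, PySem.Set.mem_ofList]
    by_cases hrho : PySem.Str.isIn "rho" (PySem.Str.lower (PySem.Str.strip raw)) = true
    · have hne : ¬ PySem.Set.contains (PySem.Set.ofList ["r", "radius", "r_m"]) (PySem.Str.lower (PySem.Str.strip raw)) = true := by
        intro hc
        have hmem := hcb.mp hc
        have hfalse : PySem.Str.isIn "rho" (PySem.Str.lower (PySem.Str.strip raw)) = false := by
          simp only [List.mem_cons, List.not_mem_nil, or_false] at hmem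
          obtain h | h | h := hmem <;> rw [h] <;> decide
        rw [hfalse] at hrho
        exact Bool.false_ne_true hrho
      rw [if_pos hrho, if_neg hne, ih]
    · rw [if_neg hrho]
      by_cases hm : PySem.Str.lower (PySem.Str.strip raw) ∈ (["r", "radius", "r_m"] : List String)
      · rw [if_pos hm, if_pos (hcb.mpr hm)]
      · rw [if_neg hm, if_neg (fun h => hm (hcb.mp h)), ih]

-- ===== VERDICT (by name: the statement is the Claim_ definition above) =====
theorem pick_colname_py_spec : Claim_equal_pick_colname_py := by
  intro names want _
  unfold Spec_pick_colname_py pick_colname_py pick_colname_py_alt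
  by_cases hr : want = "r"
  · subst hr
    have hget : PySem.Dict.get? pvB_table "r" =
        some (PySem.Set.ofList ["r", "radius", "r_m"], "r") := by decide
    simp only [hget, pvB_fold_eq, pvA_rExact_eq, pvA_sub_eq, Option.or]
    cases pvFindExact (PySem.Set.ofList ["r", "radius", "r_m"]) names <;> simp
  by_cases ht : want = "tau"
  · subst ht
    have hget : PySem.Dict.get? pvB_table "tau" =
        some (PySem.Set.ofList ["tau", "t_ratio", "dt_local/dt_inf", "dt_local/dt_infty", "t_local_over_t_inf"], "tau") := by decide
    simp only [if_neg (by decide : ¬ ("tau" : String) = "r"), hget, pvB_fold_eq,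
      pvA_exact_eq, pvA_sub_eq, Option.or]
    cases pvFindExact (PySem.Set.ofList ["tau", "t_ratio", "dt_local/dt_inf", "dt_local/dt_infty", "t_local_over_t_inf"]) names <;> simp
  by_cases hg : want = "g"
  · subst hg
    have hget : PySem.Dict.get? pvB_table "g" =
        some (PySem.Set.ofList ["g", "g_m_s2", "g_ms2", "g_r"], "g") := by decide
    simp only [if_neg (by decide : ¬ ("g" : String) = "r"), if_neg (by decide : ¬ ("g" : String) = "tau"),
      hget, pvB_fold_eq, pvA_exact_eq, pvA_sub_eq, Option.or]
    cases pvFindExact (PySem.Set.ofList ["g", "g_m_s2", "g_ms2", "g_r"]) names <;> simp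
  · have hnone : PySem.Dict.get? pvB_table want = none := by
      have h : pvB_table = PySem.Dict.mk
          [ ("r", (PySem.Set.ofList ["r", "radius", "r_m"], "r")),
            ("tau", (PySem.Set.ofList ["tau", "t_ratio", "dt_local/dt_inf", "dt_local/dt_infty", "t_local_over_t_inf"], "tau")),
            ("g", (PySem.Set.ofList ["g", "g_m_s2", "g_ms2", "g_r"], "g")) ] := by decide
      rw [h, PySem.Dict.get?_mk_cons, PySem.Dict.get?_mk_cons, PySem.Dict.get?_mk_cons]
      simp [Ne.symm hr, Ne.symm ht, Ne.symm hg, PySem.Dict.get?]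
    simp [hr, ht, hg, hnone]
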